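-- pv_equiv track=rewrite | github.com/jeemyeong/problem-solving | kakao-70.py | dfs
-- ===== SOURCE A (Python) =====
-- def dfs(strs, t, dp):
--     if t in dp:
--         return dp[t]
--     if len(t) == 0 or len(strs) == 0:
--         dp[t] = 0
--         return dp[t]
--     min_solution = 10e100
--     new_strs = set(x for x in strs)
--     for each_str in strs:
--         if t.count(each_str) == 0:
--             new_strs.remove(each_str)
--     for each_str in new_strs:
--         if t[:len(each_str)] == each_str:
--             sol = dfs(new_strs, t[len(each_str):], dp)
--             if sol != -1:
--                 min_solution = min(min_solution, sol)
--     if min_solution != 10e100: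
--         dp[t] = min_solution +1
--     else:
--         dp[t] = -1
--     return dp[t]
-- ===== SOURCE B (Python) =====
-- def dfs(strs, t, dp):
--     if t in dp:
--         return dp[t]
--     if len(t) == 0 or len(strs) == 0:
--         dp[t] = 0
--         return 0
--     n = len(t)
--     val = []  # val[m] = answer for suffix starting at position i+1+m (current i)
--     for k in range(n + 1):
--         i = n - k
--         s = t[i:]
--         if s in dp:
--             v = dp[s]
--         elif i == n:
--             v = 0
--         else:
--             best = None
--             for x in strs:
--                 if x and s.startswith(x):
--                     w = val[len(x) - 1]
--                     if w != -1 and (best is None or w < best):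
--                         best = w
--             v = -1 if best is None else best + 1
--         val.insert(0, v)
--     dp[t] = val[0]
--     return val[0]
-- ===== Notes on version B (the rewrite author's own statement) =====
-- stated objective: faster
-- what changed: A's memoized top-down recursion (which re-filters the whole string set with t.count scans at every visited suffix and threads a cache) is replaced by one bottom-up DP pass over suffix start positions of t, combining child answers by index into a value list instead of recursive calls.
import Mathlib
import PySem

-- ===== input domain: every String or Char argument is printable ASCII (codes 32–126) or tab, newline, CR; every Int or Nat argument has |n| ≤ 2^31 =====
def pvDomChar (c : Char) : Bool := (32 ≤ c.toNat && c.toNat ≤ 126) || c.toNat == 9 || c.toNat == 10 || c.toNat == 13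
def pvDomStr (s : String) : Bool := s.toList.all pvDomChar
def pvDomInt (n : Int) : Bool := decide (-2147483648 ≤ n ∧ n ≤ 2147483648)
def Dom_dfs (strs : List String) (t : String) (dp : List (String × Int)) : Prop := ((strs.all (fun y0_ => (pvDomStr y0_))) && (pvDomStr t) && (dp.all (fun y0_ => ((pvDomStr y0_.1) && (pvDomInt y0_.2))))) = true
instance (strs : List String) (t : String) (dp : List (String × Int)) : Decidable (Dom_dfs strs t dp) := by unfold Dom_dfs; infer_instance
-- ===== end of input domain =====

-- B replaces A's memoized top-down recursion (which re-filters the string set with t.count scans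
-- at every visited suffix) by one bottom-up DP pass over suffix start positions, measured faster by
-- a timing run. Both Pythons mutate dp; the equivalence proved here is about the RETURN value
-- only (A caches every visited sub-result, B writes only dp[t]).

-- ===== PORT A =====
-- A's Python recursion has no structural measure ('' ∈ strs recurses on the same t), so the port
-- carries a fuel argument; on Pre_ every recursive call strips a nonempty prefix, so the depth is
-- at most len(t)+1 and the initial fuel t.toList.length + 1 is never exhausted.
-- Python's float sentinel 10e100 for min_solution is ported as Option Int (none = sentinel);
-- exact here because no Int solution value can equal 10e100.
-- new_strs.remove(x) raises KeyError in Python when x is absent (a duplicated, non-occurring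
-- string); the port's (remove? …).getD ns covers that case totally — those inputs are outside Pre_.
def dfsA : Nat → List String → String → PySem.Dict String Int → Int × PySem.Dict String Int
  | 0, _, _, dp => (0, dp)
  | fuel+1, strs, t, dp =>
    match dp.get? t with
    | some v => (v, dp)
    | none =>
      if PySem.Str.len t = 0 ∨ strs.length = 0 then
        (0, dp.insert t 0)
      else
        let new_strs : List String := strs.foldl
          (fun ns x => if PySem.Str.count t x = 0 then (PySem.List.remove? ns x).getD ns else ns)
          (PySem.Set.ofList strs)
        let r := new_strs.foldl
          (fun (acc : Option Int × PySem.Dict String Int) x =>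
            if PySem.Str.slice t none (some (PySem.Str.len x)) == x then
              let sd := dfsA fuel new_strs (PySem.Str.slice t (some (PySem.Str.len x)) none) acc.2
              if sd.1 ≠ -1 then (some (min (acc.1.getD sd.1) sd.1), sd.2) else (acc.1, sd.2)
            else acc)
          (none, dp)
        match r.1 with
        | some m => (m + 1, r.2.insert t (m + 1))
        | none => (-1, r.2.insert t (-1))

def dfs (strs : List String) (t : String) (dp : List (String × Int)) : Int :=
  (dfsA (t.toList.length + 1) strs t ⟨dp⟩).1

-- ===== PORT B =====
-- Bottom-up DP: val is grown from the shortest suffix to the whole string by prepending, so during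
-- iteration k (suffix start i = n - k) val holds the answers for positions i+1 .. n and
-- val[len(x)-1] is the answer after stripping prefix x (always in range: x is a nonempty prefix
-- of the current suffix, so the port's (pyGet? ...).getD 0 default is never used on Pre_).
def dfsBstep (d : PySem.Dict String Int) (strs : List String) (t : String) (val : List Int) (k : Int) : List Int :=
  let i : Int := PySem.Str.len t - k
  let s := PySem.Str.slice t (some i) none
  let v : Int :=
    match d.get? s with
    | some v => v
    | none =>
      if i = PySem.Str.len t then 0
      else
        let best := strs.foldl
          (fun (best : Option Int) x =>
            if x ≠ "" ∧ PySem.Str.startswith s x then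
              if (PySem.List.pyGet? val (PySem.Str.len x - 1)).getD 0 ≠ -1 ∧
                  (best = none ∨ (PySem.List.pyGet? val (PySem.Str.len x - 1)).getD 0 < best.getD 0) then
                some ((PySem.List.pyGet? val (PySem.Str.len x - 1)).getD 0)
              else best
            else best)
          none
        match best with
        | some b => b + 1
        | none => -1
  v :: val

def dfs_alt (strs : List String) (t : String) (dp : List (String × Int)) : Int :=
  let d : PySem.Dict String Int := ⟨dp⟩
  match d.get? t with
  | some v => v
  | none =>
    if PySem.Str.len t = 0 ∨ strs.length = 0 then 0
    else
      let val : List Int := (PySem.List.pyRange 0 (PySem.Str.len t + 1) 1).foldl (dfsBstep d strs t) []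
      (PySem.List.pyGet? val 0).getD 0

-- ===== PRECONDITION & SPEC =====
-- Pre_ excludes exactly the inputs where the Python A raises instead of returning: when A
-- actually recurses (t not memoized, t nonempty, strs nonempty), '' ∈ strs gives an infinite
-- recursion (RecursionError) and a duplicated string that does not occur in t makes
-- new_strs.remove raise KeyError on its second removal.
def Pre_dfs (strs : List String) (t : String) (dp : List (String × Int)) : Prop :=
  ((PySem.Dict.mk dp).get? t).isSome ∨ t = "" ∨ strs = [] ∨
    ("" ∉ strs ∧ ∀ x ∈ strs, PySem.Str.count t x = 0 → strs.count x ≤ 1)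
instance (strs : List String) (t : String) (dp : List (String × Int)) : Decidable (Pre_dfs strs t dp) := by unfold Pre_dfs; infer_instance

def pvWitness_dfs : List String × String × (List (String × Int)) := (["ab", "b"], "abb", [("x", 1)])

def Spec_dfs (strs : List String) (t : String) (dp : List (String × Int)) (out : Int) : Prop := out = dfs_alt strs t dp
instance (strs : List String) (t : String) (dp : List (String × Int)) (out : Int) : Decidable (Spec_dfs strs t dp out) := by unfold Spec_dfs; infer_instance

-- ===== CLAIM (what is proved, stated in full; the proofs are below) =====
def Claim_equal_dfs : Prop := ∀ (strs : List String) (t : String) (dp : List (String × Int)), Dom_dfs strs t dp → Pre_dfs strs t dp → Spec_dfs strs t dp (dfs strs t dp)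

-- ===== LEMMAS AND PROOFS =====


-- option-min (the float sentinel 10e100 / Python's None accumulator)
def omin : Option Int → Option Int → Option Int
  | none, b => b
  | some a, none => some a
  | some a, some b => some (min a b)

theorem omin_none_right (a : Option Int) : omin a none = a := by cases a <;> rfl

theorem omin_assoc (a b c : Option Int) : omin (omin a b) c = omin a (omin b c) := by
  cases a <;> cases b <;> cases c <;> simp [omin, min_assoc]

theorem foldl_min_eq (l : List Int) : ∀ a b : Int, l.foldl min (min a b) = min a (l.foldl min b) := by
  induction l with
  | nil => intro a b; rfl
  | cons c l ih =>
    intro a b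
    show l.foldl min (min (min a b) c) = min a (l.foldl min (min b c))
    rw [min_assoc, ih]

theorem min?_cons_omin (w : Int) (l : List Int) : (w :: l).min? = omin (some w) l.min? := by
  cases l with
  | nil => rfl
  | cons c l =>
    show some ((c :: l).foldl min w) = omin (some w) (some ((l).foldl min c))
    show some (l.foldl min (min w c)) = some (min w (l.foldl min c))
    rw [foldl_min_eq]

theorem min?_congr (l1 l2 : List Int) (h : ∀ x, x ∈ l1 ↔ x ∈ l2) : l1.min? = l2.min? := by
  cases h1 : l1.min? with
  | none =>
    rw [List.min?_eq_none_iff] at h1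
    subst h1
    cases h2 : l2.min? with
    | none => rfl
    | some m =>
      have := List.min?_mem h2
      rw [← h] at this
      simp at this
  | some m =>
    rw [List.min?_eq_some_iff] at h1
    symm
    rw [List.min?_eq_some_iff]
    exact ⟨(h m).1 h1.1, fun b hb => h1.2 b ((h b).2 hb)⟩

theorem count_go_ge (sub : List Char) : ∀ (fuel : Nat) (l : List Char) (acc : Nat),
    acc ≤ PySem.Chars.count.go sub fuel l acc := by
  intro fuel
  induction fuel with
  | zero => intro l acc; simp [PySem.Chars.count.go]
  | succ fuel ih =>
    intro l acc
    cases l with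
    | nil => simp [PySem.Chars.count.go]
    | cons c t =>
      rw [PySem.Chars.count.go]
      split
      · exact le_trans (Nat.le_succ acc) (ih _ _)
      · exact ih _ _

theorem count_go_not_infix (sub : List Char) : ∀ (fuel : Nat) (l : List Char) (acc : Nat),
    ¬ sub <:+: l → PySem.Chars.count.go sub fuel l acc = acc := by
  intro fuel
  induction fuel with
  | zero => intro l acc _; simp [PySem.Chars.count.go]
  | succ fuel ih =>
    intro l acc h
    cases l with
    | nil => simp [PySem.Chars.count.go]
    | cons c t =>
      rw [PySem.Chars.count.go]
      split
      · rename_i hpre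
        exact absurd (List.IsPrefix.isInfix (List.isPrefixOf_iff_prefix.mp hpre)) h
      · exact ih t acc (fun hi => h (hi.trans (List.suffix_cons c t).isInfix))

theorem count_go_pos (sub : List Char) (hs : sub ≠ []) : ∀ (fuel : Nat) (l : List Char) (acc : Nat),
    sub <:+: l → l.length ≤ fuel → acc < PySem.Chars.count.go sub fuel l acc := by
  intro fuel
  induction fuel with
  | zero =>
    intro l acc hi hf
    have : l = [] := List.length_eq_zero_iff.mp (Nat.le_zero.mp hf)
    subst this
    exact absurd (List.infix_nil.mp hi) hs
  | succ fuel ih =>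
    intro l acc hi hf
    cases l with
    | nil => exact absurd (List.infix_nil.mp hi) hs
    | cons c t =>
      rw [PySem.Chars.count.go]
      split
      · exact lt_of_lt_of_le (Nat.lt_succ_self acc) (count_go_ge _ _ _ _)
      · rename_i hpre
        apply ih t acc _ (by simpa using hf)
        obtain ⟨p, q, hpq⟩ := hi
        cases p with
        | nil =>
          exfalso
          apply hpre
          exact List.isPrefixOf_iff_prefix.mpr ⟨q, hpq⟩
        | cons a p' =>
          refine ⟨p', q, ?_⟩
          simpa using congrArg List.tail hpq

theorem count_ne_zero_iff (s sub : List Char) : PySem.Chars.count s sub ≠ 0 ↔ sub <:+: s := by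
  unfold PySem.Chars.count
  by_cases h : sub.isEmpty
  · simp only [h, if_pos]
    have : sub = [] := by simpa [List.isEmpty_iff] using h
    subst this
    simp
  · simp only [h, if_neg, Bool.false_eq_true, not_false_iff]
    have hs : sub ≠ [] := by simpa [List.isEmpty_iff] using h
    constructor
    · intro hne
      by_contra hni
      exact hne (count_go_not_infix sub s.length s 0 hni)
    · intro hi
      have := count_go_pos sub hs s.length s 0 hi le_rfl
      omega

theorem str_count_ne_zero_iff (t x : String) : PySem.Str.count t x ≠ 0 ↔ x.toList <:+: t.toList := by
  rw [PySem.Str.count_eq]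
  exact count_ne_zero_iff _ _

theorem get?_mk_append (l1 l2 : List (String × Int)) (k : String) :
    (PySem.Dict.mk (l1 ++ l2)).get? k = ((PySem.Dict.mk l1).get? k).or ((PySem.Dict.mk l2).get? k) := by
  induction l1 with
  | nil => simp [PySem.Dict.get?]
  | cons p l1 ih =>
    obtain ⟨a, b⟩ := p
    rw [List.cons_append, PySem.Dict.get?_mk_cons, PySem.Dict.get?_mk_cons]
    split
    · rfl
    · exact ih

theorem get?_mk_mem (l : List (String × Int)) (k : String) (v : Int)
    (h : (PySem.Dict.mk l).get? k = some v) : (k, v) ∈ l := by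
  induction l with
  | nil => simp [PySem.Dict.get?] at h
  | cons p l ih =>
    obtain ⟨a, b⟩ := p
    rw [PySem.Dict.get?_mk_cons] at h
    by_cases hk : a == k
    · rw [if_pos hk] at h
      have ha : a = k := by simpa using hk
      have hb : b = v := Option.some_inj.mp h
      subst ha; subst hb
      exact List.mem_cons_self
    · rw [if_neg (by simpa using hk)] at h
      exact List.mem_cons_of_mem _ (ih h)

-- the canonical per-suffix value: what both programs compute for the suffix of tl starting at i
def W (strs : List String) (d : PySem.Dict String Int) (tl : List Char) (i : Nat) : Int :=
  match d.get? (String.ofList (tl.drop i)) with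
  | some v => v
  | none =>
    if h : tl.length ≤ i then 0
    else
      match ((((strs.filter (fun x => x ≠ "" && x.toList.isPrefixOf (tl.drop i))).attach.map
          (fun z => W strs d tl (i + z.1.toList.length))).filter (fun w => w ≠ -1)).min?) with
      | some m => m + 1
      | none => -1
termination_by tl.length - i
decreasing_by
  have hz2 := z.2
  simp only [List.mem_filter] at hz2
  have hx : z.1 ≠ "" := by
    have := hz2.2
    simp at this
    exact this.1
  have hlen : z.1.toList ≠ [] := by
    intro hl
    exact hx (by rw [← @String.ofList_toList z.1, hl, String.ofList_nil])
  have : 0 < z.1.toList.length := List.length_pos_iff.mpr hlen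
  omega
-- Python's 'if best is None or w < best: best = w' accumulates, over the guarded elements, the
-- minimum of the values ≠ -1 (None if there is none)
theorem foldBest (P : String → Prop) [DecidablePred P] (f : String → Int) :
    ∀ (l : List String) (b : Option Int),
    l.foldl (fun best x =>
        if P x then
          if f x ≠ -1 ∧ (best = none ∨ f x < best.getD 0) then some (f x) else best
        else best) b
      = omin b (((l.filter (fun x => decide (P x))).map f).filter (fun w => w ≠ -1)).min? := by
  intro l
  induction l with
  | nil => intro b; simp [omin_none_right]
  | cons x l ih =>
    intro b
    rw [List.foldl_cons]
    by_cases hP : P x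
    · rw [List.filter_cons_of_pos (by simpa using hP), List.map_cons]
      by_cases hf : f x = -1
      · rw [List.filter_cons_of_neg (by simpa using hf)]
        rw [ih]
        congr 1
        rw [if_pos hP, if_neg (by simp [hf])]
      · rw [List.filter_cons_of_pos (by simpa using hf)]
        rw [ih, min?_cons_omin, ← omin_assoc]
        congr 1
        rw [if_pos hP]
        cases b with
        | none => rw [if_pos ⟨hf, Or.inl rfl⟩]; rfl
        | some b0 =>
          by_cases hlt : f x < b0
          · rw [if_pos ⟨hf, Or.inr (by simpa using hlt)⟩]
            simp [omin, min_eq_right (le_of_lt hlt)]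
          · rw [if_neg (by simp [hf]; omega)]
            simp [omin, min_eq_left (by omega : b0 ≤ f x)]
    · rw [List.filter_cons_of_neg (by simpa using hP), if_neg hP]
      exact ih b

-- the 'for each_str in strs: if t.count(each_str)==0: new_strs.remove(each_str)' loop
theorem removeFold (P : String → Prop) [DecidablePred P] : ∀ (iter cur : List String), cur.Nodup →
    iter.foldl (fun ns x => if P x then (PySem.List.remove? ns x).getD ns else ns) cur
      = cur.filter (fun y => !(decide (P y) && iter.contains y)) := by
  intro iter
  induction iter with
  | nil => intro cur _; simp
  | cons x iter ih =>
    intro cur hnd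
    rw [List.foldl_cons]
    have hcur' : (if P x then (PySem.List.remove? cur x).getD cur else cur)
        = cur.filter (fun y => !(decide (P y) && (y == x))) := by
      by_cases h0 : P x
      · rw [if_pos h0]
        by_cases hmem : x ∈ cur
        · rw [PySem.List.remove?_eq_some_erase cur x hmem, Option.getD_some, hnd.erase_eq_filter]
          apply List.filter_congr
          intro y hy
          by_cases hyx : y = x
          · subst hyx; simp [h0]
          · have hb : (y == x) = false := beq_eq_false_iff_ne.mpr hyx
            simp [bne, hb]
        · rw [(PySem.List.remove?_eq_none_iff cur x).mpr hmem, Option.getD_none]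
          symm
          rw [List.filter_eq_self]
          intro y hy
          have hyx : y ≠ x := fun h => hmem (h ▸ hy)
          simp [hyx]
      · rw [if_neg h0]
        symm
        rw [List.filter_eq_self]
        intro y hy
        by_cases hyx : y = x
        · subst hyx; simp [h0]
        · simp [hyx]
    rw [hcur', ih _ (List.Nodup.filter _ hnd), List.filter_filter]
    apply List.filter_congr
    intro y hy
    by_cases h0 : P y
    · by_cases hyx : y = x
      · subst hyx; simp [h0]
      · simp [h0, hyx, List.contains_cons]
    · simp [h0]

-- new entries an A-call may add to dp: memo values of suffixes of t, absent from the initial dp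
def ExtOK (strs : List String) (tl : List Char) (dp : List (String × Int)) (ext : List (String × Int)) : Prop :=
  ∀ p ∈ ext, ∃ j, j ≤ tl.length ∧ p.1 = String.ofList (tl.drop j) ∧
    p.2 = W strs ⟨dp⟩ tl j ∧ (PySem.Dict.mk dp).get? p.1 = none

def ExtFrom (tl : List Char) (i : Nat) (ext ext' : List (String × Int)) : Prop :=
  ∀ p ∈ ext', p ∈ ext ∨ ∃ j, i ≤ j ∧ p.1 = String.ofList (tl.drop j)

-- the condition A's recursion maintains on its strs argument
def StrsOK (strs0 : List String) (tl : List Char) (i : Nat) (strs' : List String) : Prop :=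
  strs' ≠ [] ∧ (∀ x ∈ strs', x ∈ strs0) ∧ (∀ x ∈ strs0, x.toList <:+: tl.drop i → x ∈ strs')


theorem valFoldAux (strs : List String) (t : String) (dp : List (String × Int))
    (ht : t.toList ≠ []) :
    ∀ k : Nat, k ≤ t.toList.length + 1 →
    (PySem.List.pyRange 0 (k : Int) 1).foldl (dfsBstep ⟨dp⟩ strs t) []
      = (List.range k).map (fun m => W strs ⟨dp⟩ t.toList (t.toList.length + 1 - k + m)) := by
  intro k
  induction k with
  | zero =>
    intro _
    rw [PySem.List.pyRange_one_eq_nil (by norm_num)]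
    simp
  | succ k ih =>
    intro hk
    have hkn : k ≤ t.toList.length := by omega
    rw [show ((k+1 : Nat) : Int) = (k : Int) + 1 by push_cast; ring,
      PySem.List.pyRange_one_succ_right (by exact_mod_cast Nat.zero_le k),
      List.foldl_append, ih (by omega), List.foldl_cons, List.foldl_nil]
    simp only [dfsBstep]
    have hi : (PySem.Str.len t - (k : Int)) = ((t.toList.length - k : Nat) : Int) := by
      rw [PySem.Str.len_eq]; omega
    rw [hi]
    have hs_eq : PySem.Str.slice t (some ((t.toList.length - k : Nat) : Int)) none
        = String.ofList (t.toList.drop (t.toList.length - k)) := by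
      have h1 : (PySem.Str.slice t (some ((t.toList.length - k : Nat) : Int)) none).toList
          = t.toList.drop (t.toList.length - k) := by
        rw [PySem.Str.toList_slice]
        exact PySem.List.slice_from_natCast _ _
      rw [← h1, String.ofList_toList]
    rw [hs_eq]
    have hcons : (List.range (k+1)).map (fun m => W strs ⟨dp⟩ t.toList (t.toList.length + 1 - (k+1) + m))
        = W strs ⟨dp⟩ t.toList (t.toList.length - k)
          :: (List.range k).map (fun m => W strs ⟨dp⟩ t.toList (t.toList.length + 1 - k + m)) := by
      rw [List.range_succ_eq_map, List.map_cons, List.map_map]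
      congr 1
      · exact congrArg (W strs ⟨dp⟩ t.toList) (by omega)
      · apply List.map_congr_left
        intro m hm
        exact congrArg (W strs ⟨dp⟩ t.toList) (by omega)
    rw [hcons]
    congr 1
    -- the head: the step's value equals W at position n - k
    rw [W]
    cases hget : (PySem.Dict.mk dp).get? (String.ofList (t.toList.drop (t.toList.length - k))) with
    | some v => rfl
    | none =>
      by_cases hk0 : k = 0
      · subst hk0
        rw [if_pos (by rw [PySem.Str.len_eq]; omega), dif_pos (by omega)]
      · have hn1 : 1 ≤ t.toList.length := by
          have := List.length_pos_iff.mpr ht; omega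
        rw [if_neg (by rw [PySem.Str.len_eq]; omega), dif_neg (by omega)]
        rw [foldBest (fun x => x ≠ "" ∧ PySem.Str.startswith (String.ofList (t.toList.drop (t.toList.length - k))) x = true)
          (fun x => (PySem.List.pyGet? ((List.range k).map (fun m => W strs ⟨dp⟩ t.toList (t.toList.length + 1 - k + m))) (PySem.Str.len x - 1)).getD 0) strs none]
        have hfilter : strs.filter (fun x => decide (x ≠ "" ∧ PySem.Str.startswith (String.ofList (t.toList.drop (t.toList.length - k))) x = true))
            = strs.filter (fun x => x ≠ "" && x.toList.isPrefixOf (t.toList.drop (t.toList.length - k))) := by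
          apply List.filter_congr
          intro x _
          simp only [PySem.Str.startswith_eq, PySem.Chars.startswith, Bool.decide_and, decide_eq_true_eq,
            String.toList_ofList, Bool.decide_coe]
        rw [hfilter]
        have hmap : ∀ x ∈ strs.filter (fun x => x ≠ "" && x.toList.isPrefixOf (t.toList.drop (t.toList.length - k))),
            (PySem.List.pyGet? ((List.range k).map (fun m => W strs ⟨dp⟩ t.toList (t.toList.length + 1 - k + m))) (PySem.Str.len x - 1)).getD 0
              = W strs ⟨dp⟩ t.toList ((t.toList.length - k) + x.toList.length) := by
          intro x hx
          rw [List.mem_filter] at hx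
          have hx2 := hx.2
          simp only [Bool.and_eq_true, decide_eq_true_eq] at hx2
          have hxpre : x.toList <+: t.toList.drop (t.toList.length - k) := List.isPrefixOf_iff_prefix.mp hx2.2
          have hxlen : x.toList.length ≤ k := by
            have := hxpre.length_le
            rw [List.length_drop] at this
            omega
          have hxpos : 0 < x.toList.length :=
            List.length_pos_iff.mpr (fun hl => hx2.1 (by rw [← @String.ofList_toList x, hl, String.ofList_nil]))
          rw [PySem.Str.len_eq,
            show ((x.toList.length : Int) - 1) = ((x.toList.length - 1 : Nat) : Int) by omega,
            PySem.List.pyGet?_natCast]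
          rw [List.getElem?_map, List.getElem?_range (by omega)]
          simp only [Option.map_some, Option.getD_some]
          exact congrArg (W strs ⟨dp⟩ t.toList) (by omega)
        have hattach : (List.filter (fun x => decide (x ≠ "") && x.toList.isPrefixOf (List.drop (t.toList.length - k) t.toList)) strs).attach.map
              (fun z => W strs ⟨dp⟩ t.toList (t.toList.length - k + z.1.toList.length))
            = (List.filter (fun x => decide (x ≠ "") && x.toList.isPrefixOf (List.drop (t.toList.length - k) t.toList)) strs).map
              (fun x => W strs ⟨dp⟩ t.toList (t.toList.length - k + x.toList.length)) :=
          @List.attach_map_val String Int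
            (List.filter (fun x => decide (x ≠ "") && x.toList.isPrefixOf (List.drop (t.toList.length - k) t.toList)) strs)
            (fun x => W strs ⟨dp⟩ t.toList (t.toList.length - k + x.toList.length))
        rw [List.map_congr_left hmap, hattach]
        rfl

theorem dfs_alt_eq_W (strs : List String) (t : String) (dp : List (String × Int))
    (hm : (PySem.Dict.mk dp).get? t = none) (ht : t.toList ≠ []) (hs : strs ≠ []) :
    dfs_alt strs t dp = W strs ⟨dp⟩ t.toList 0 := by
  have hn0 : t.toList.length ≠ 0 := fun h => ht (List.length_eq_zero_iff.mp h)
  simp only [dfs_alt, hm]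
  rw [if_neg (by
    rintro (h | h)
    · rw [PySem.Str.len_eq] at h; omega
    · exact hs (List.length_eq_zero_iff.mp h))]
  have hlen1 : (PySem.Str.len t + 1 : Int) = ((t.toList.length + 1 : Nat) : Int) := by
    rw [PySem.Str.len_eq]; push_cast; ring
  rw [hlen1, valFoldAux strs t dp ht (t.toList.length + 1) le_rfl]
  rw [List.range_succ_eq_map, List.map_cons, PySem.List.pyGet?_zero_cons, Option.getD_some]
  exact congrArg (W strs ⟨dp⟩ t.toList) (by omega)

theorem get?_mk_none_not_mem (l : List (String × Int)) (k : String) (v : Int)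
    (h : (PySem.Dict.mk l).get? k = none) : (k, v) ∉ l := by
  intro hmem
  induction l with
  | nil => simp at hmem
  | cons p l ih =>
    rw [PySem.Dict.get?_mk_cons] at h
    rcases List.mem_cons.mp hmem with rfl | hmem'
    · simp at h
    · by_cases hk : p.1 == k
      · rw [if_pos hk] at h; simp at h
      · rw [if_neg (by simpa using hk)] at h
        exact ih h hmem'

-- the string-prefix test A performs: t[:len(x)] == x
theorem sliceEq_iff (tlS : List Char) (x : String) :
    ((PySem.Str.slice (String.ofList tlS) none (some (PySem.Str.len x)) == x) = true)
      ↔ x.toList <+: tlS := by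
  rw [beq_iff_eq, PySem.Str.len_eq]
  constructor
  · intro h
    have := congrArg String.toList h
    rw [PySem.Str.toList_slice] at this
    have h2 : PySem.Chars.slice (String.ofList tlS).toList none (some (x.toList.length : Int))
        = tlS.take x.toList.length := by
      rw [String.toList_ofList]
      exact PySem.List.slice_to_natCast _ _
    rw [h2] at this
    rw [List.prefix_iff_eq_take]
    calc x.toList = (tlS.take x.toList.length) := this.symm
    _ = List.take x.toList.length tlS := rfl
  · intro h
    have h2 : (PySem.Str.slice (String.ofList tlS) none (some (x.toList.length : Int))).toList = x.toList := by
      rw [PySem.Str.toList_slice, String.toList_ofList]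
      exact (PySem.List.slice_to_natCast tlS x.toList.length).trans (List.prefix_iff_eq_take.mp h).symm
    calc PySem.Str.slice (String.ofList tlS) none (some (x.toList.length : Int))
        = String.ofList (PySem.Str.slice (String.ofList tlS) none (some (x.toList.length : Int))).toList := (String.ofList_toList).symm
      _ = String.ofList x.toList := by rw [h2]
      _ = x := String.ofList_toList

theorem sliceFrom_eq (tl : List Char) (i : Nat) (x : String) :
    PySem.Str.slice (String.ofList (tl.drop i)) (some (PySem.Str.len x)) none
      = String.ofList (tl.drop (i + x.toList.length)) := by
  have h : (PySem.Str.slice (String.ofList (tl.drop i)) (some (PySem.Str.len x)) none).toList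
      = tl.drop (i + x.toList.length) := by
    rw [PySem.Str.toList_slice, String.toList_ofList, PySem.Str.len_eq]
    exact (PySem.List.slice_from_natCast (tl.drop i) x.toList.length).trans
      (by rw [List.drop_drop, Nat.add_comm])
  rw [← h, String.ofList_toList]

theorem str_ne_empty_len (x : String) (hx : x ≠ "") : 0 < x.toList.length :=
  List.length_pos_iff.mpr (fun hl => hx (by rw [← @String.ofList_toList x, hl, String.ofList_nil]))

theorem foldA_aux (strs0 : List String) (tl : List Char) (dp : List (String × Int))
    (hnil : "" ∉ strs0) (i : Nat) (new_strs : List String) (fuel : Nat)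
    (hchar : ∀ x, x ∈ new_strs → (x ∈ strs0 ∧ x.toList <:+: tl.drop i))
    (hi : i < tl.length)
    (hrec : ∀ j (ext : List (String × Int)), i < j → j ≤ tl.length → new_strs ≠ [] →
      ExtOK strs0 tl dp ext →
      ∃ ext', ExtOK strs0 tl dp ext' ∧ ExtFrom tl j ext ext' ∧
        dfsA fuel new_strs (String.ofList (tl.drop j)) ⟨dp ++ ext⟩
          = (W strs0 ⟨dp⟩ tl j, ⟨dp ++ ext'⟩)) :
    ∀ (l : List String) (ms : Option Int) (ext : List (String × Int)),
      (∀ x ∈ l, x ∈ new_strs) → ExtOK strs0 tl dp ext →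
      ∃ ext', ExtOK strs0 tl dp ext' ∧ ExtFrom tl (i+1) ext ext' ∧
        l.foldl (fun (acc : Option Int × PySem.Dict String Int) x =>
            if PySem.Str.slice (String.ofList (tl.drop i)) none (some (PySem.Str.len x)) == x then
              let sd := dfsA fuel new_strs
                (PySem.Str.slice (String.ofList (tl.drop i)) (some (PySem.Str.len x)) none) acc.2
              if sd.1 ≠ -1 then (some (min (acc.1.getD sd.1) sd.1), sd.2) else (acc.1, sd.2)
            else acc) (ms, ⟨dp ++ ext⟩)
          = (omin ms (((l.filter (fun x => x.toList.isPrefixOf (tl.drop i))).map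
                (fun x => W strs0 ⟨dp⟩ tl (i + x.toList.length))).filter (fun w => w ≠ -1)).min?,
             ⟨dp ++ ext'⟩) := by
  intro l
  induction l with
  | nil =>
    intro ms ext _ hext
    refine ⟨ext, hext, fun p hp => Or.inl hp, ?_⟩
    simp [omin_none_right]
  | cons x l ih =>
    intro ms ext hl hext
    have hx := hchar x (hl x List.mem_cons_self)
    have hxne : x ≠ "" := fun h => hnil (h ▸ hx.1)
    have hxpos : 0 < x.toList.length := str_ne_empty_len x hxne
    rw [List.foldl_cons]
    by_cases hpre : x.toList <+: tl.drop i
    · rw [if_pos (by exact_mod_cast (sliceEq_iff (tl.drop i) x).mpr hpre)]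
      have hjle : i + x.toList.length ≤ tl.length := by
        have := hpre.length_le
        rw [List.length_drop] at this
        omega
      obtain ⟨ext₁, hOK1, hFrom1, heq⟩ :=
        hrec (i + x.toList.length) ext (by omega) hjle
          (List.ne_nil_of_mem (hl x List.mem_cons_self)) hext
      rw [sliceFrom_eq tl i x]
      simp only [heq]
      rw [List.filter_cons_of_pos (p := fun (y : String) => y.toList.isPrefixOf (tl.drop i))
        (List.isPrefixOf_iff_prefix.mpr hpre), List.map_cons]
      by_cases hW : W strs0 ⟨dp⟩ tl (i + x.toList.length) = -1
      · rw [if_neg (not_not_intro hW),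
          List.filter_cons_of_neg (p := fun (w : Int) => decide (w ≠ -1))
            (by simp only [decide_eq_true_eq]; exact not_not_intro hW)]
        obtain ⟨ext₂, hOK2, hFrom2, heq2⟩ := ih ms ext₁ (fun y hy => hl y (List.mem_cons_of_mem _ hy)) hOK1
        refine ⟨ext₂, hOK2, ?_, heq2⟩
        intro p hp
        rcases hFrom2 p hp with hp1 | hp1
        · rcases hFrom1 p hp1 with hp2 | ⟨j, hj1, hj2⟩
          · exact Or.inl hp2
          · exact Or.inr ⟨j, by omega, hj2⟩
        · exact Or.inr hp1
      · rw [if_pos hW, List.filter_cons_of_pos (p := fun (w : Int) => decide (w ≠ -1)) (decide_eq_true hW)]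
        have hms : (some (min (ms.getD (W strs0 ⟨dp⟩ tl (i + x.toList.length))) (W strs0 ⟨dp⟩ tl (i + x.toList.length))))
            = omin ms (some (W strs0 ⟨dp⟩ tl (i + x.toList.length))) := by
          cases ms with
          | none => simp [omin, Option.getD_none, min_self]
          | some m => rfl
        rw [hms]
        obtain ⟨ext₂, hOK2, hFrom2, heq2⟩ :=
          ih (omin ms (some (W strs0 ⟨dp⟩ tl (i + x.toList.length)))) ext₁
            (fun y hy => hl y (List.mem_cons_of_mem _ hy)) hOK1
        refine ⟨ext₂, hOK2, ?_, ?_⟩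
        · intro p hp
          rcases hFrom2 p hp with hp1 | hp1
          · rcases hFrom1 p hp1 with hp2 | ⟨j, hj1, hj2⟩
            · exact Or.inl hp2
            · exact Or.inr ⟨j, by omega, hj2⟩
          · exact Or.inr hp1
        · rw [heq2, min?_cons_omin, ← omin_assoc]
    · rw [if_neg (by
        intro hc
        exact hpre ((sliceEq_iff (tl.drop i) x).mp (by exact_mod_cast hc)))]
      rw [List.filter_cons_of_neg (p := fun (y : String) => y.toList.isPrefixOf (tl.drop i))
        (fun h => hpre (List.isPrefixOf_iff_prefix.mp h))]
      exact ih ms ext (fun y hy => hl y (List.mem_cons_of_mem _ hy)) hext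

theorem dfsA_main (strs0 : List String) (tl : List Char) (dp : List (String × Int))
    (hnil : "" ∉ strs0) :
    ∀ (fuel : Nat) (i : Nat) (strs' : List String) (ext : List (String × Int)),
      tl.length - i < fuel → i ≤ tl.length → StrsOK strs0 tl i strs' →
      ExtOK strs0 tl dp ext →
      ∃ ext', ExtOK strs0 tl dp ext' ∧ ExtFrom tl i ext ext' ∧
        dfsA fuel strs' (String.ofList (tl.drop i)) ⟨dp ++ ext⟩
          = (W strs0 ⟨dp⟩ tl i, ⟨dp ++ ext'⟩) := by
  intro fuel
  induction fuel with
  | zero => intro i strs' ext hfuel _ _ _; omega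
  | succ fuel ih =>
    intro i strs' ext hfuel hi hstrs hext
    obtain ⟨hne, hsub, hclo⟩ := hstrs
    simp only [dfsA]
    cases hget : (PySem.Dict.mk (dp ++ ext)).get? (String.ofList (tl.drop i)) with
    | some v =>
      have hv : v = W strs0 ⟨dp⟩ tl i := by
        rw [get?_mk_append] at hget
        cases h0 : (PySem.Dict.mk dp).get? (String.ofList (tl.drop i)) with
        | some v0 =>
          rw [h0, Option.some_or] at hget
          rw [W, h0]
          exact (Option.some_inj.mp hget).symm
        | none =>
          rw [h0, Option.none_or] at hget
          obtain ⟨j, hjle, hkey, hval, _⟩ := hext _ (get?_mk_mem _ _ _ hget)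
          have hdropeq : tl.drop j = tl.drop i := String.ofList_inj.mp hkey.symm
          have hji : j = i := by
            have := congrArg List.length hdropeq
            rw [List.length_drop, List.length_drop] at this
            omega
          have hval' : v = W strs0 ⟨dp⟩ tl j := hval
          rw [hji] at hval'
          exact hval'
      exact ⟨ext, hext, fun p hp => Or.inl hp, by rw [hv]⟩
    | none =>
      have hor := (get?_mk_append dp ext (String.ofList (tl.drop i))).symm.trans hget
      have h0dp : (PySem.Dict.mk dp).get? (String.ofList (tl.drop i)) = none :=
        (Option.or_eq_none_iff.mp hor).1
      have h0ext : (PySem.Dict.mk ext).get? (String.ofList (tl.drop i)) = none :=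
        (Option.or_eq_none_iff.mp hor).2
      by_cases hbase : tl.length ≤ i
      · rw [if_pos (Or.inl (by
          rw [PySem.Str.len_eq, String.toList_ofList, List.length_drop]
          omega))]
        have hW0 : W strs0 ⟨dp⟩ tl i = 0 := by
          rw [W]
          simp only [h0dp]
          rw [dif_pos hbase]
        have hcont : (PySem.Dict.mk (dp ++ ext)).contains (String.ofList (tl.drop i)) = false := by
          rw [PySem.Dict.contains_eq_isSome_get?, hget]
          rfl
        have hins : (PySem.Dict.mk (dp ++ ext)).insert (String.ofList (tl.drop i)) 0
            = PySem.Dict.mk (dp ++ (ext ++ [(String.ofList (tl.drop i), 0)])) := by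
          apply PySem.Dict.ext
          rw [PySem.Dict.items_insert_of_not_contains _ _ hcont]
          exact List.append_assoc _ _ _
        refine ⟨ext ++ [(String.ofList (tl.drop i), 0)], ?_, ?_, ?_⟩
        · intro p hp
          rcases List.mem_append.mp hp with hp1 | hp1
          · exact hext p hp1
          · have : p = (String.ofList (tl.drop i), 0) := by simpa using hp1
            subst this
            exact ⟨i, hi, rfl, hW0.symm, h0dp⟩
        · intro p hp
          rcases List.mem_append.mp hp with hp1 | hp1
          · exact Or.inl hp1
          · have : p = (String.ofList (tl.drop i), 0) := by simpa using hp1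
            subst this
            exact Or.inr ⟨i, le_rfl, rfl⟩
        · rw [hW0, hins]
      · have hilt : i < tl.length := by omega
        rw [if_neg (by
          rintro (h | h)
          · rw [PySem.Str.len_eq, String.toList_ofList, List.length_drop] at h
            omega
          · exact hne (List.length_eq_zero_iff.mp h))]
        have hns_eq := removeFold (fun x => PySem.Str.count (String.ofList (tl.drop i)) x = 0)
          strs' (PySem.Set.ofList strs') (PySem.Set.nodup_ofList strs')
        have hchar' : ∀ x, x ∈ strs'.foldl (fun ns x => if PySem.Str.count (String.ofList (tl.drop i)) x = 0
              then (PySem.List.remove? ns x).getD ns else ns) (PySem.Set.ofList strs')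
            ↔ (x ∈ strs0 ∧ x.toList <:+: tl.drop i) := by
          intro x
          rw [hns_eq, List.mem_filter]
          constructor
          · rintro ⟨h1, h2⟩
            have hx' : x ∈ strs' := by
              rw [PySem.Set.mem_ofList] at h1
              exact h1
            refine ⟨hsub x hx', ?_⟩
            have hcount : PySem.Str.count (String.ofList (tl.drop i)) x ≠ 0 := by
              intro hc
              rw [PySem.Str.count_eq, String.toList_ofList] at hc
              simp [hx'] at h2
              exact h2 hc
            have := (str_count_ne_zero_iff (String.ofList (tl.drop i)) x).mp hcount
            rwa [String.toList_ofList] at this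
          · rintro ⟨hx0, hinf⟩
            have hx' : x ∈ strs' := hclo x hx0 hinf
            have hcount : PySem.Str.count (String.ofList (tl.drop i)) x ≠ 0 := by
              apply (str_count_ne_zero_iff (String.ofList (tl.drop i)) x).mpr
              rw [String.toList_ofList]
              exact hinf
            refine ⟨by rw [PySem.Set.mem_ofList]; exact hx', ?_⟩
            have hcount' : ¬ PySem.Chars.count (List.drop i tl) x.toList = 0 := by
              rw [PySem.Str.count_eq, String.toList_ofList] at hcount
              exact hcount
            simp [hcount']
        have hrec' : ∀ j (ext₁ : List (String × Int)), i < j → j ≤ tl.length →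
            (strs'.foldl (fun ns x => if PySem.Str.count (String.ofList (tl.drop i)) x = 0
              then (PySem.List.remove? ns x).getD ns else ns) (PySem.Set.ofList strs')) ≠ [] →
            ExtOK strs0 tl dp ext₁ →
            ∃ ext', ExtOK strs0 tl dp ext' ∧ ExtFrom tl j ext₁ ext' ∧
              dfsA fuel (strs'.foldl (fun ns x => if PySem.Str.count (String.ofList (tl.drop i)) x = 0
                  then (PySem.List.remove? ns x).getD ns else ns) (PySem.Set.ofList strs'))
                (String.ofList (tl.drop j)) ⟨dp ++ ext₁⟩
                = (W strs0 ⟨dp⟩ tl j, ⟨dp ++ ext'⟩) := by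
          intro j ext₁ hij hjle hnsne hOK1
          apply ih j _ ext₁ (by omega) hjle ?_ hOK1
          refine ⟨hnsne, fun x hx => ((hchar' x).mp hx).1, ?_⟩
          intro x hx0 hinf
          apply (hchar' x).mpr
          refine ⟨hx0, ?_⟩
          have hsubfix : tl.drop j <:+ tl.drop i := by
            rw [show tl.drop j = (tl.drop i).drop (j - i) by rw [List.drop_drop]; congr 1; omega]
            exact List.drop_suffix _ _
          exact hinf.trans hsubfix.isInfix
        obtain ⟨ext₂, hOK2, hFrom2, hfold⟩ := foldA_aux strs0 tl dp hnil i _ fuel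
          (fun x hx => (hchar' x).mp hx) hilt hrec' _ none ext (fun x hx => hx) hext
        rw [hfold]
        have hkeynotins₂ : (PySem.Dict.mk ext₂).get? (String.ofList (tl.drop i)) = none := by
          cases h : (PySem.Dict.mk ext₂).get? (String.ofList (tl.drop i)) with
          | none => rfl
          | some v =>
            exfalso
            have hmem := get?_mk_mem _ _ _ h
            rcases hFrom2 _ hmem with hmem1 | ⟨j, hj1, hj2⟩
            · exact get?_mk_none_not_mem ext (String.ofList (tl.drop i)) v h0ext hmem1
            · have hkey' : String.ofList (tl.drop i) = String.ofList (tl.drop j) := hj2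
              have hdropeq := String.ofList_inj.mp hkey'
              have := congrArg List.length hdropeq
              rw [List.length_drop, List.length_drop] at this
              omega
        have hget₂ : (PySem.Dict.mk (dp ++ ext₂)).get? (String.ofList (tl.drop i)) = none := by
          rw [get?_mk_append, h0dp, hkeynotins₂]
          rfl
        have hcont₂ : (PySem.Dict.mk (dp ++ ext₂)).contains (String.ofList (tl.drop i)) = false := by
          rw [PySem.Dict.contains_eq_isSome_get?, hget₂]
          rfl
        have hattach : (strs0.filter (fun x => x ≠ "" && x.toList.isPrefixOf (tl.drop i))).attach.map
              (fun z => W strs0 ⟨dp⟩ tl (i + z.1.toList.length))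
            = (strs0.filter (fun x => x ≠ "" && x.toList.isPrefixOf (tl.drop i))).map
              (fun x => W strs0 ⟨dp⟩ tl (i + x.toList.length)) :=
          @List.attach_map_val String Int
            (strs0.filter (fun x => x ≠ "" && x.toList.isPrefixOf (tl.drop i)))
            (fun x => W strs0 ⟨dp⟩ tl (i + x.toList.length))
        have hWi : W strs0 ⟨dp⟩ tl i
            = match (((strs0.filter (fun x => x ≠ "" && x.toList.isPrefixOf (tl.drop i))).map
                  (fun x => W strs0 ⟨dp⟩ tl (i + x.toList.length))).filter (fun w => w ≠ -1)).min? with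
              | some m => m + 1
              | none => -1 := by
          rw [W]
          simp only [h0dp]
          rw [dif_neg hbase, hattach]
        have hmm : ((((strs'.foldl (fun ns x => if PySem.Str.count (String.ofList (tl.drop i)) x = 0
                then (PySem.List.remove? ns x).getD ns else ns) (PySem.Set.ofList strs')).filter
                (fun x => x.toList.isPrefixOf (tl.drop i))).map
                (fun x => W strs0 ⟨dp⟩ tl (i + x.toList.length))).filter (fun w => w ≠ -1)).min?
            = (((strs0.filter (fun x => x ≠ "" && x.toList.isPrefixOf (tl.drop i))).map
                (fun x => W strs0 ⟨dp⟩ tl (i + x.toList.length))).filter (fun w => w ≠ -1)).min? := by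
          apply min?_congr
          intro w
          simp only [List.mem_filter, List.mem_map, decide_eq_true_eq, Bool.and_eq_true]
          constructor
          · rintro ⟨⟨x, ⟨hx1, hx2⟩, rfl⟩, hw⟩
            have hx0 := (hchar' x).mp hx1
            have hxne : x ≠ "" := fun h => hnil (h ▸ hx0.1)
            exact ⟨⟨x, ⟨hx0.1, hxne, hx2⟩, rfl⟩, hw⟩
          · rintro ⟨⟨x, ⟨hx1, hxne, hx2⟩, rfl⟩, hw⟩
            have hpre := List.isPrefixOf_iff_prefix.mp hx2
            have hxin : x ∈ strs'.foldl (fun ns x => if PySem.Str.count (String.ofList (tl.drop i)) x = 0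
                then (PySem.List.remove? ns x).getD ns else ns) (PySem.Set.ofList strs') :=
              (hchar' x).mpr ⟨hx1, hpre.isInfix⟩
            exact ⟨⟨x, ⟨hxin, hx2⟩, rfl⟩, hw⟩
        simp only [omin]
        rw [hmm]
        cases hE : (((strs0.filter (fun x => x ≠ "" && x.toList.isPrefixOf (tl.drop i))).map
            (fun x => W strs0 ⟨dp⟩ tl (i + x.toList.length))).filter (fun w => w ≠ -1)).min? with
        | some m =>
          have hWival : W strs0 ⟨dp⟩ tl i = m + 1 := by rw [hWi, hE]
          have hins : (PySem.Dict.mk (dp ++ ext₂)).insert (String.ofList (tl.drop i)) (m + 1)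
              = PySem.Dict.mk (dp ++ (ext₂ ++ [(String.ofList (tl.drop i), m + 1)])) := by
            apply PySem.Dict.ext
            rw [PySem.Dict.items_insert_of_not_contains _ _ hcont₂]
            exact List.append_assoc _ _ _
          refine ⟨ext₂ ++ [(String.ofList (tl.drop i), m + 1)], ?_, ?_, ?_⟩
          · intro p hp
            rcases List.mem_append.mp hp with hp1 | hp1
            · exact hOK2 p hp1
            · have : p = (String.ofList (tl.drop i), m + 1) := by simpa using hp1
              subst this
              exact ⟨i, hi, rfl, hWival.symm, h0dp⟩
          · intro p hp
            rcases List.mem_append.mp hp with hp1 | hp1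
            · rcases hFrom2 p hp1 with hp2 | ⟨j, hj1, hj2⟩
              · exact Or.inl hp2
              · exact Or.inr ⟨j, by omega, hj2⟩
            · have : p = (String.ofList (tl.drop i), m + 1) := by simpa using hp1
              subst this
              exact Or.inr ⟨i, le_rfl, rfl⟩
          · show (m + 1, (PySem.Dict.mk (dp ++ ext₂)).insert (String.ofList (tl.drop i)) (m + 1)) = _
            rw [hWival, hins]
        | none =>
          have hWival : W strs0 ⟨dp⟩ tl i = -1 := by rw [hWi, hE]
          have hins : (PySem.Dict.mk (dp ++ ext₂)).insert (String.ofList (tl.drop i)) (-1)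
              = PySem.Dict.mk (dp ++ (ext₂ ++ [(String.ofList (tl.drop i), -1)])) := by
            apply PySem.Dict.ext
            rw [PySem.Dict.items_insert_of_not_contains _ _ hcont₂]
            exact List.append_assoc _ _ _
          refine ⟨ext₂ ++ [(String.ofList (tl.drop i), -1)], ?_, ?_, ?_⟩
          · intro p hp
            rcases List.mem_append.mp hp with hp1 | hp1
            · exact hOK2 p hp1
            · have : p = (String.ofList (tl.drop i), -1) := by simpa using hp1
              subst this
              exact ⟨i, hi, rfl, hWival.symm, h0dp⟩
          · intro p hp
            rcases List.mem_append.mp hp with hp1 | hp1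
            · rcases hFrom2 p hp1 with hp2 | ⟨j, hj1, hj2⟩
              · exact Or.inl hp2
              · exact Or.inr ⟨j, by omega, hj2⟩
            · have : p = (String.ofList (tl.drop i), -1) := by simpa using hp1
              subst this
              exact Or.inr ⟨i, le_rfl, rfl⟩
          · show ((-1 : Int), (PySem.Dict.mk (dp ++ ext₂)).insert (String.ofList (tl.drop i)) (-1)) = _
            rw [hWival, hins]

-- ===== VERDICT (by name: the statement is the Claim_ definition above) =====
theorem dfs_spec : Claim_equal_dfs := by
  intro strs t dp _ hpre
  unfold Spec_dfs
  cases hm : (PySem.Dict.mk dp).get? t with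
  | some v =>
    have hA : dfs strs t dp = v := by
      unfold dfs
      simp only [dfsA, hm]
    have hB : dfs_alt strs t dp = v := by
      simp only [dfs_alt, hm]
    rw [hA, hB]
  | none =>
    by_cases htriv : t = "" ∨ strs = []
    · have hcond : PySem.Str.len t = 0 ∨ strs.length = 0 := by
        rcases htriv with h | h
        · exact Or.inl (by rw [h]; rfl)
        · exact Or.inr (by rw [h]; rfl)
      have hA : dfs strs t dp = 0 := by
        unfold dfs
        simp only [dfsA, hm]
        rw [if_pos hcond]
      have hB : dfs_alt strs t dp = 0 := by
        simp only [dfs_alt, hm]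
        rw [if_pos hcond]
      rw [hA, hB]
    · push_neg at htriv
      obtain ⟨ht, hs⟩ := htriv
      have hnil : "" ∉ strs := by
        rcases hpre with h | h | h | ⟨h, _⟩
        · rw [hm] at h; simp at h
        · exact absurd h ht
        · exact absurd h hs
        · exact h
      have htl : t.toList ≠ [] := fun h =>
        ht (by rw [← @String.ofList_toList t, h, String.ofList_nil])
      obtain ⟨ext', hOK, hFrom, heq⟩ := dfsA_main strs t.toList dp hnil
        (t.toList.length + 1) 0 strs [] (by omega) (by omega)
        ⟨hs, fun x hx => hx, fun x hx _ => hx⟩ (by intro p hp; simp at hp)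
      rw [List.drop_zero, String.ofList_toList, List.append_nil] at heq
      have hA : dfs strs t dp = W strs ⟨dp⟩ t.toList 0 := by
        unfold dfs
        rw [heq]
      rw [hA, dfs_alt_eq_W strs t dp hm htl hs]
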